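-- pv_equiv track=rewrite | github.com/mafuba8/adventofcode | 2020/day17/day17-2.py | count_active_neighbours
-- ===== SOURCE A (Python) =====
-- def count_active_neighbours(xyzw: tuple[int, int, int, int], state: list) -> int:
--     """Counts the number of active neighbouring cubes."""
--     # Run through all 80 neighbours (not counting the cube itself).
--     count = 0
--     for dx in [-1, 0, 1]:
--         for dy in [-1, 0, 1]:
--             for dz in [-1, 0, 1]:
--                 for dw in [-1, 0, 1]:
--                     n = (xyzw[0] + dx, xyzw[1] + dy, xyzw[2] + dz, xyzw[3] + dw)
--                     if n != xyzw and n in state: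
--                         count += 1
--     return count
-- ===== SOURCE B (Python) =====
-- def count_active_neighbours(xyzw: tuple[int, int, int, int], state: list) -> int:
--     """Counts the number of active neighbouring cubes."""
--     cells = set(state)
--     count = 0
--     for c in cells:
--         if c != xyzw and all(abs(c[k] - xyzw[k]) <= 1 for k in range(4)):
--             count += 1
--     return count
-- ===== Notes on version B (the rewrite author's own statement) =====
-- stated objective: faster
-- what changed: Instead of enumerating all 81 offset combinations and doing a list-membership scan for each, B makes one pass over the distinct active cells and counts those within Chebyshev distance 1 of xyzw (and different from it).
import Mathlib
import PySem

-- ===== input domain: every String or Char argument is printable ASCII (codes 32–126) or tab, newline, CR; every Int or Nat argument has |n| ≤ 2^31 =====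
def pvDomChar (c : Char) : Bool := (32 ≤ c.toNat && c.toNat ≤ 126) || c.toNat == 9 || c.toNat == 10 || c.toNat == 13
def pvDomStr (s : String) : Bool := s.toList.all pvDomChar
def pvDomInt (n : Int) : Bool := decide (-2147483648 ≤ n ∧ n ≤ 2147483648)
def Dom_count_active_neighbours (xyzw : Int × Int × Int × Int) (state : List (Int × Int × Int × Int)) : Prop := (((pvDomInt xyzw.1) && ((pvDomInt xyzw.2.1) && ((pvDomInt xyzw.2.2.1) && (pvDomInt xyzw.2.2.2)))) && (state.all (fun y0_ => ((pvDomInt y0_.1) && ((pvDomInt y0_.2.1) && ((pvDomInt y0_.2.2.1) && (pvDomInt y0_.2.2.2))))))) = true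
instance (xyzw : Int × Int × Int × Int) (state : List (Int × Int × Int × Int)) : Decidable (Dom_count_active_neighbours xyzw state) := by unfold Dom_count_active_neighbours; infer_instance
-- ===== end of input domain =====

-- B replaces A's scan of all 81 offset combinations (each with a list-membership test)
-- by one pass over the distinct active cells, counting those within Chebyshev distance 1
-- of xyzw and different from it (objective: faster, one pass instead of 81 membership scans).

-- ===== PORT A =====
-- literal transliteration of A: four nested loops over [-1, 0, 1], membership test in `state`
def count_active_neighbours (xyzw : Int × Int × Int × Int) (state : List (Int × Int × Int × Int)) : Int :=
  List.foldl (fun count dx =>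
    List.foldl (fun count dy =>
      List.foldl (fun count dz =>
        List.foldl (fun count dw =>
          let n : Int × Int × Int × Int :=
            (xyzw.1 + dx, xyzw.2.1 + dy, xyzw.2.2.1 + dz, xyzw.2.2.2 + dw)
          if n ≠ xyzw ∧ n ∈ state then count + 1 else count)
          count ([-1, 0, 1] : List Int))
        count ([-1, 0, 1] : List Int))
      count ([-1, 0, 1] : List Int))
    0 ([-1, 0, 1] : List Int)

-- ===== PORT B =====
-- literal transliteration of B: cells = set(state); one loop over cells; `all(abs(c[k] - xyzw[k]) <= 1
-- for k in range(4))` is unrolled to the conjunction of the four component tests (tuple indexing by k)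
def count_active_neighbours_alt (xyzw : Int × Int × Int × Int) (state : List (Int × Int × Int × Int)) : Int :=
  let cells : PySem.Set (Int × Int × Int × Int) := PySem.Set.ofList state
  List.foldl (fun count c =>
    if c ≠ xyzw ∧ (|c.1 - xyzw.1| ≤ 1 ∧ |c.2.1 - xyzw.2.1| ≤ 1 ∧
                   |c.2.2.1 - xyzw.2.2.1| ≤ 1 ∧ |c.2.2.2 - xyzw.2.2.2| ≤ 1)
    then count + 1 else count) 0 cells

-- ===== PRECONDITION & SPEC =====
def Spec_count_active_neighbours (xyzw : Int × Int × Int × Int) (state : List (Int × Int × Int × Int)) (out : Int) : Prop := out = count_active_neighbours_alt xyzw state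
instance (xyzw : Int × Int × Int × Int) (state : List (Int × Int × Int × Int)) (out : Int) : Decidable (Spec_count_active_neighbours xyzw state out) := by unfold Spec_count_active_neighbours; infer_instance

-- ===== CLAIM (what is proved, stated in full; the proofs are below) =====
def Claim_equal_count_active_neighbours : Prop := ∀ (xyzw : Int × Int × Int × Int) (state : List (Int × Int × Int × Int)), Dom_count_active_neighbours xyzw state → Spec_count_active_neighbours xyzw state (count_active_neighbours xyzw state)

-- ===== LEMMAS AND PROOFS =====

-- the 81 offsets A enumerates, flattened
def pvDeltas : List (Int × Int × Int × Int) :=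
  ([-1, 0, 1] : List Int).flatMap fun dx =>
    ([-1, 0, 1] : List Int).flatMap fun dy =>
      ([-1, 0, 1] : List Int).flatMap fun dz =>
        ([-1, 0, 1] : List Int).map fun dw => (dx, dy, dz, dw)

def pvShift (xyzw δ : Int × Int × Int × Int) : Int × Int × Int × Int :=
  (xyzw.1 + δ.1, xyzw.2.1 + δ.2.1, xyzw.2.2.1 + δ.2.2.1, xyzw.2.2.2 + δ.2.2.2)

-- countP distributes over flatMap (not found in Mathlib)
theorem pv_countP_flatMap {α β : Type} (l : List α) (f : α → List β) (p : β → Bool) :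
    (l.flatMap f).countP p = (l.map (fun a => (f a).countP p)).sum := by
  induction l with
  | nil => simp
  | cons a t ih => simp [List.flatMap_cons, List.countP_append, ih]

-- A's nested loops count exactly the shifted offsets that hit `state`
theorem pv_A_eq (xyzw : Int × Int × Int × Int) (state : List (Int × Int × Int × Int)) :
    count_active_neighbours xyzw state
      = (((pvDeltas.map (pvShift xyzw)).countP
            (fun n => decide (n ≠ xyzw ∧ n ∈ state))) : Int) := by
  simp only [count_active_neighbours, PySem.List.foldl_ite_add_one, PySem.List.foldl_add,
    zero_add, pvDeltas, pvShift, List.map_flatMap, List.map_map, pv_countP_flatMap,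
    List.countP_map, Function.comp_def]
  push_cast
  rfl

-- the image of the 81 offsets is exactly the Chebyshev-1 ball around xyzw
theorem pv_mem_nbrs (xyzw n : Int × Int × Int × Int) :
    n ∈ pvDeltas.map (pvShift xyzw) ↔
      (|n.1 - xyzw.1| ≤ 1 ∧ |n.2.1 - xyzw.2.1| ≤ 1 ∧
       |n.2.2.1 - xyzw.2.2.1| ≤ 1 ∧ |n.2.2.2 - xyzw.2.2.2| ≤ 1) := by
  obtain ⟨x1, x2, x3, x4⟩ := xyzw
  obtain ⟨n1, n2, n3, n4⟩ := n
  simp only [pvDeltas, pvShift, List.mem_map, List.mem_flatMap, List.mem_cons,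
    List.not_mem_nil, or_false, abs_le]
  constructor
  · rintro ⟨δ, ⟨dx, hx, dy, hy, dz, hz, dw, hw, rfl⟩, heq⟩
    simp only [Prod.mk.injEq] at heq
    omega
  · rintro ⟨⟨g1, g1'⟩, ⟨g2, g2'⟩, ⟨g3, g3'⟩, g4, g4'⟩
    refine ⟨(n1 - x1, n2 - x2, n3 - x3, n4 - x4),
      ⟨n1 - x1, by omega, n2 - x2, by omega, n3 - x3, by omega, n4 - x4, by omega, rfl⟩, ?_⟩
    simp only [Prod.mk.injEq]
    omega

theorem pv_nodup_nbrs (xyzw : Int × Int × Int × Int) :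
    (pvDeltas.map (pvShift xyzw)).Nodup := by
  refine List.Nodup.map ?_ (by decide)
  intro a b hab
  obtain ⟨a1, a2, a3, a4⟩ := a
  obtain ⟨b1, b2, b3, b4⟩ := b
  simp only [pvShift, Prod.mk.injEq] at hab ⊢
  omega

-- counting distinct elements satisfying a predicate is invariant under the filtered-set equality
theorem pv_countP_eq_of_nodup {α : Type} [DecidableEq α] (l₁ l₂ : List α) (p q : α → Bool)
    (h₁ : l₁.Nodup) (h₂ : l₂.Nodup)
    (h : ∀ x, (x ∈ l₁ ∧ p x = true) ↔ (x ∈ l₂ ∧ q x = true)) :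
    l₁.countP p = l₂.countP q := by
  rw [List.countP_eq_length_filter, List.countP_eq_length_filter,
    ← List.toFinset_card_of_nodup (h₁.filter p), ← List.toFinset_card_of_nodup (h₂.filter q)]
  congr 1
  ext x
  simp only [List.mem_toFinset, List.mem_filter]
  exact h x

-- B counts the distinct cells of `state` that are Chebyshev-1 neighbours of xyzw
theorem pv_B_eq (xyzw : Int × Int × Int × Int) (state : List (Int × Int × Int × Int)) :
    count_active_neighbours_alt xyzw state
      = (((PySem.Set.ofList state).countP
            (fun c => decide (c ≠ xyzw ∧ (|c.1 - xyzw.1| ≤ 1 ∧ |c.2.1 - xyzw.2.1| ≤ 1 ∧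
              |c.2.2.1 - xyzw.2.2.1| ≤ 1 ∧ |c.2.2.2 - xyzw.2.2.2| ≤ 1)))) : Int) := by
  simp only [count_active_neighbours_alt, PySem.List.foldl_ite_add_one, zero_add]

-- ===== VERDICT (by name: the statement is the Claim_ definition above) =====
theorem count_active_neighbours_spec : Claim_equal_count_active_neighbours := by
  intro xyzw state _
  unfold Spec_count_active_neighbours
  rw [pv_A_eq, pv_B_eq]
  norm_cast
  apply pv_countP_eq_of_nodup _ _ _ _ (pv_nodup_nbrs xyzw) (PySem.Set.nodup_ofList state)
  intro x
  simp only [decide_eq_true_eq, pv_mem_nbrs, PySem.Set.mem_ofList]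
  tauto
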